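-- pv_equiv track=rewrite | github.com/tkddn2626/test | build.py | remove_multiline_comments_safe
-- ===== SOURCE A (Python) =====
-- def remove_multiline_comments_safe(content):
--     """멀티라인 주석을 안전하게 제거 (문자열 내부는 보호)"""
--     result = []
--     i = 0
--     in_string = False
--     string_char = None
--     in_comment = False
--
--     while i < len(content):
--         char = content[i]
--
--         # 문자열 처리
--         if not in_comment and char in ['"', "'", '`']:
--             if not in_string:
--                 in_string = True
--                 string_char = char
--             elif char == string_char and (i == 0 or content[i-1] != '\\'):
--                 in_string = False
--                 string_char = None
--
--         # 문자열 내부에서는 주석 처리하지 않음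
--         if in_string:
--             result.append(char)
--             i += 1
--             continue
--
--         # 멀티라인 주석 시작
--         if not in_comment and i < len(content) - 1 and content[i:i+2] == '/*':
--             in_comment = True
--             i += 2
--             continue
--
--         # 멀티라인 주석 끝
--         if in_comment and i < len(content) - 1 and content[i:i+2] == '*/':
--             in_comment = False
--             i += 2
--             continue
--
--         # 주석 내부가 아니면 문자 추가
--         if not in_comment:
--             result.append(char)
--
--         i += 1
--
--     return ''.join(result)
-- ===== SOURCE B (Python) =====
-- def remove_multiline_comments_safe(content):
--     """Block-jump version: str.find locates the next quote or '/*'; strings are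
--     copied wholesale up to their unescaped closing quote, comments are skipped
--     wholesale up to '*/'."""
--     out = []
--     i = 0
--     while i < len(content):
--         candidates = [p for p in (content.find('"', i), content.find("'", i),
--                                   content.find('`', i), content.find('/*', i))
--                       if p != -1]
--         if not candidates:
--             out.append(content[i:])
--             break
--         p = min(candidates)
--         if content[p] == '/':
--             out.append(content[i:p])
--             e = content.find('*/', p + 2)
--             if e == -1:
--                 break
--             i = e + 2
--         else:
--             q = content[p]
--             out.append(content[i:p + 1])
--             j = content.find(q, p + 1)
--             while j != -1 and content[j - 1] == '\\':
--                 j = content.find(q, j + 1)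
--             if j == -1:
--                 out.append(content[p + 1:])
--                 break
--             out.append(content[p + 1:j + 1])
--             i = j + 1
--     return ''.join(out)
-- ===== Notes on version B (the rewrite author's own statement) =====
-- stated objective: faster
-- what changed: Replaced A's char-by-char state machine (in_string/in_comment flags updated at every index) with a block-jump scanner: str.find locates the next quote or comment opener, string literals are copied wholesale up to their first unescaped closing quote, and comments are skipped wholesale to the closing delimiter.
import Mathlib
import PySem

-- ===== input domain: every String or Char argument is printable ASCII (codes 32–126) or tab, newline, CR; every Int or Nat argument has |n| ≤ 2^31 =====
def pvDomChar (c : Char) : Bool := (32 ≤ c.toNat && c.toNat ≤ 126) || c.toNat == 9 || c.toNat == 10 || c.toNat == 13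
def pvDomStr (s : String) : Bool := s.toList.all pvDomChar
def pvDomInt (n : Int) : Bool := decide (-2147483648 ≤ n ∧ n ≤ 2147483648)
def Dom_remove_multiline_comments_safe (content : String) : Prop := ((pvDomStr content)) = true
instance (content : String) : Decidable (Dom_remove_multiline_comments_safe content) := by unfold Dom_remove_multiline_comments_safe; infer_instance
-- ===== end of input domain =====

-- B replaces A's char-by-char state machine with a block-jump scanner built on str.find (constant-factor speedup measured); proven to return the same string.

-- ===== PORT A =====
-- A's while loop: index i, state (in_string, string_char, in_comment), result accumulator.
def loopA (cs : List Char) (i : Nat) (inS : Bool) (sc : Option Char) (inC : Bool) (acc : List Char) : List Char :=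
  if h : i < cs.length then
    let c := cs[i]
    -- '문자열 처리' block: recompute (in_string, string_char)
    let st : Bool × Option Char :=
      if inC = false ∧ (c = '"' ∨ c = '\'' ∨ c = '`') then
        if inS = false then (true, some c)
        else if some c = sc ∧ (i = 0 ∨ cs[i-1]? ≠ some '\\') then (false, none)
        else (inS, sc)
      else (inS, sc)
    if st.1 = true then loopA cs (i+1) st.1 st.2 inC (acc ++ [c])
    else if inC = false ∧ i + 1 < cs.length ∧ cs[i]? = some '/' ∧ cs[i+1]? = some '*' then
      loopA cs (i+2) st.1 st.2 true acc
    else if inC = true ∧ i + 1 < cs.length ∧ cs[i]? = some '*' ∧ cs[i+1]? = some '/' then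
      loopA cs (i+2) st.1 st.2 false acc
    else loopA cs (i+1) st.1 st.2 inC (if inC = false then acc ++ [c] else acc)
  else acc
termination_by cs.length - i
decreasing_by all_goals omega

def remove_multiline_comments_safe (content : String) : String :=
  String.ofList (loopA content.toList 0 false none false [])

-- ===== PORT B =====
-- str.find(pat, s): first index ≥ s where pat occurs (none = -1)
def findFrom (cs pat : List Char) (s : Nat) : Option Nat :=
  if _h : s ≤ cs.length then
    if pat.isPrefixOf (cs.drop s) then some s
    else findFrom cs pat (s + 1)
  else none
termination_by cs.length + 1 - s
decreasing_by omega

-- bound lemma used for termination of the callers below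
theorem findFrom_ge (cs pat : List Char) (s : Nat) :
    ∀ j, findFrom cs pat s = some j → s ≤ j ∧ j ≤ cs.length := by
  fun_induction findFrom with
  | case1 s h hp => intro j hj; simp only [Option.some.injEq] at hj; omega
  | case2 s h hp ih => intro j hj; have := ih j hj; omega
  | case3 s h => intro j hj; simp at hj

-- B's inner while: first occurrence of q at/after s whose previous char is not '\'
def findClose (cs : List Char) (q : Char) (s : Nat) : Option Nat :=
  match hj : findFrom cs [q] s with
  | none => none
  | some j => if cs[j-1]? = some '\\' then findClose cs q (j + 1) else some j
termination_by cs.length + 1 - s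
decreasing_by have := findFrom_ge cs [q] s j hj; omega

theorem findClose_ge (cs : List Char) (q : Char) (s : Nat) :
    ∀ j, findClose cs q s = some j → s ≤ j ∧ j ≤ cs.length := by
  fun_induction findClose with
  | case1 => intro j hj; simp at hj
  | case2 s j hj hesc ih => intro j' hj'; have h1 := findFrom_ge cs [q] s j hj
                            have := ih j' hj'; omega
  | case3 s j hj hesc => intro j' hj'; simp only [Option.some.injEq] at hj'
                         have := findFrom_ge cs [q] s j hj; omega

-- 'min(candidates)' over the non-(-1) find results
def minOpt (a b : Option Nat) : Option Nat :=
  match a, b with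
  | none, b => b
  | a, none => a
  | some x, some y => some (min x y)

theorem minOpt_ge (a b : Option Nat) (s : Nat)
    (ha : ∀ x, a = some x → s ≤ x) (hb : ∀ x, b = some x → s ≤ x) :
    ∀ x, minOpt a b = some x → s ≤ x := by
  intro x hx
  cases a with
  | none => exact hb x (by simpa [minOpt] using hx)
  | some u => cases b with
    | none => exact ha x (by simpa [minOpt] using hx)
    | some v =>
      simp only [minOpt, Option.some.injEq] at hx
      have h1 := ha u rfl; have h2 := hb v rfl; omega

theorem minOpt_ge' (cs : List Char) (i : Nat) (p1 p2 p3 p4 : List Char) :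
    ∀ x, minOpt (minOpt (findFrom cs p1 i) (findFrom cs p2 i))
          (minOpt (findFrom cs p3 i) (findFrom cs p4 i)) = some x → i ≤ x := by
  have g : ∀ pat, ∀ y, findFrom cs pat i = some y → i ≤ y :=
    fun pat y hy => (findFrom_ge cs pat i y hy).1
  exact minOpt_ge _ _ i (minOpt_ge _ _ i (g p1) (g p2)) (minOpt_ge _ _ i (g p3) (g p4))

-- B's outer while loop
def loopB (cs : List Char) (i : Nat) (acc : List Char) : List Char :=
  if hi : i < cs.length then
    match hp : minOpt (minOpt (findFrom cs ['"'] i) (findFrom cs ['\''] i))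
               (minOpt (findFrom cs ['`'] i) (findFrom cs ['/', '*'] i)) with
    | none => acc ++ cs.drop i
    | some p =>
      -- content[p]: in range, since findFrom only returns match positions
      if cs.getD p ' ' = '/' then
        let acc2 := acc ++ (cs.drop i).take (p - i)
        match he : findFrom cs ['*', '/'] (p + 2) with
        | none => acc2
        | some e => loopB cs (e + 2) acc2
      else
        let acc2 := acc ++ (cs.drop i).take (p + 1 - i)
        match hj : findClose cs (cs.getD p ' ') (p + 1) with
        | none => acc2 ++ cs.drop (p + 1)
        | some j => loopB cs (j + 1) (acc2 ++ (cs.drop (p + 1)).take (j - p))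
  else acc
termination_by cs.length - i
decreasing_by
  · have hpge := minOpt_ge' cs i _ _ _ _ p hp
    have := findFrom_ge cs ['*', '/'] (p + 2) e he; omega
  · have hpge := minOpt_ge' cs i _ _ _ _ p hp
    have := findClose_ge cs (cs.getD p ' ') (p + 1) j hj; omega

def remove_multiline_comments_safe_alt (content : String) : String :=
  String.ofList (loopB content.toList 0 [])

-- ===== PRECONDITION & SPEC =====
def Spec_remove_multiline_comments_safe (content : String) (out : String) : Prop := out = remove_multiline_comments_safe_alt content
instance (content : String) (out : String) : Decidable (Spec_remove_multiline_comments_safe content out) := by unfold Spec_remove_multiline_comments_safe; infer_instance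

-- ===== CLAIM (what is proved, stated in full; the proofs are below) =====
def Claim_equal_remove_multiline_comments_safe : Prop := ∀ (content : String), Dom_remove_multiline_comments_safe content → Spec_remove_multiline_comments_safe content (remove_multiline_comments_safe content)

-- ===== LEMMAS AND PROOFS =====

-- the quoted special characters
def SpP (cs : List Char) (t : Nat) : Prop :=
  ((['"'] <+: cs.drop t ∨ ['\''] <+: cs.drop t) ∨ (['`'] <+: cs.drop t ∨ ['/', '*'] <+: cs.drop t))

-- "r is the first index ≥ s satisfying P (none = no such index)"
def IsFirst (P : Nat → Prop) (s : Nat) (r : Option Nat) : Prop :=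
  match r with
  | none => ∀ t, s ≤ t → ¬ P t
  | some p => s ≤ p ∧ P p ∧ ∀ t, s ≤ t → t < p → ¬ P t

theorem prefix_one_iff (cs : List Char) (c : Char) (t : Nat) :
    [c] <+: cs.drop t ↔ cs[t]? = some c := by
  have h0 : cs[t]? = (cs.drop t)[0]? := by simp [List.getElem?_drop]
  cases hd : cs.drop t with
  | nil => rw [hd] at h0; simp [h0]
  | cons a tl => rw [hd] at h0; simp [List.cons_prefix_cons, h0, eq_comm]

theorem prefix_two_iff (cs : List Char) (c d : Char) (t : Nat) :
    [c, d] <+: cs.drop t ↔ cs[t]? = some c ∧ cs[t+1]? = some d := by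
  have h0 : cs[t]? = (cs.drop t)[0]? := by simp [List.getElem?_drop]
  have h1 : cs[t+1]? = (cs.drop t)[1]? := by rw [List.getElem?_drop]
  cases hd : cs.drop t with
  | nil => rw [hd] at h0; simp [h0]
  | cons a tl =>
    rw [hd] at h0 h1
    cases tl with
    | nil => simp [List.cons_prefix_cons, h0, h1, eq_comm]
    | cons b tl2 => simp [List.cons_prefix_cons, h0, h1, eq_comm]

theorem IsFirst_weaken (P : Nat → Prop) (s s' : Nat) (r : Option Nat)
    (hs : s ≤ s') (hgap : ∀ t, s ≤ t → t < s' → ¬ P t) (h : IsFirst P s' r) :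
    IsFirst P s r := by
  cases r with
  | none =>
    intro t ht
    by_cases h' : t < s'
    · exact hgap t ht h'
    · exact h t (by omega)
  | some p =>
    obtain ⟨h1, h2, h3⟩ := h
    refine ⟨by omega, h2, ?_⟩
    intro t ht htp
    by_cases h' : t < s'
    · exact hgap t ht h'
    · exact h3 t (by omega) htp

theorem IsFirst_eq (P : Nat → Prop) (s : Nat) (r1 r2 : Option Nat)
    (h1 : IsFirst P s r1) (h2 : IsFirst P s r2) : r1 = r2 := by
  cases r1 with
  | none =>
    cases r2 with
    | none => rfl
    | some p => exact absurd h2.2.1 (h1 p h2.1)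
  | some p =>
    cases r2 with
    | none => exact absurd h1.2.1 (h2 p h1.1)
    | some p' =>
      obtain ⟨a1, a2, a3⟩ := h1
      obtain ⟨b1, b2, b3⟩ := h2
      congr 1
      by_contra hne
      rcases Nat.lt_or_ge p p' with h | h
      · exact b3 p a1 h a2
      · exact a3 p' b1 (by omega) b2

theorem findFrom_isFirst (cs pat : List Char) (s : Nat) (hne : pat ≠ []) :
    IsFirst (fun t => pat <+: cs.drop t) s (findFrom cs pat s) := by
  fun_induction findFrom with
  | case1 s h hp =>
    exact ⟨Nat.le_refl s, List.isPrefixOf_iff_prefix.mp hp, fun t ht htl => by omega⟩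
  | case2 s h hp ih =>
    refine IsFirst_weaken _ s (s+1) _ (by omega) ?_ ih
    intro t ht htl
    have : t = s := by omega
    subst this; exact fun hc => hp (List.isPrefixOf_iff_prefix.mpr hc)
  | case3 s h =>
    intro t ht hp
    have : cs.drop t = [] := List.drop_eq_nil_of_le (by omega)
    rw [this] at hp
    exact hne (List.prefix_nil.mp hp)

theorem minOpt_isFirst (P Q : Nat → Prop) (s : Nat) (a b : Option Nat)
    (ha : IsFirst P s a) (hb : IsFirst Q s b) :
    IsFirst (fun t => P t ∨ Q t) s (minOpt a b) := by
  cases a with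
  | none =>
    cases b with
    | none =>
      intro t ht
      push_neg
      exact ⟨ha t ht, hb t ht⟩
    | some p =>
      obtain ⟨b1, b2, b3⟩ := hb
      exact ⟨b1, Or.inr b2, fun t ht htp => by push_neg; exact ⟨ha t ht, b3 t ht htp⟩⟩
  | some p =>
    cases b with
    | none =>
      obtain ⟨a1, a2, a3⟩ := ha
      exact ⟨a1, Or.inl a2, fun t ht htp => by push_neg; exact ⟨a3 t ht htp, hb t ht⟩⟩
    | some p' =>
      obtain ⟨a1, a2, a3⟩ := ha
      obtain ⟨b1, b2, b3⟩ := hb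
      show IsFirst _ s (some (min p p'))
      rcases Nat.le_total p p' with h | h
      · rw [Nat.min_eq_left h]
        exact ⟨a1, Or.inl a2, fun t ht htp => by push_neg; exact ⟨a3 t ht htp, b3 t ht (by omega)⟩⟩
      · rw [Nat.min_eq_right h]
        exact ⟨b1, Or.inr b2, fun t ht htp => by push_neg; exact ⟨a3 t ht (by omega), b3 t ht htp⟩⟩

theorem findClose_isFirst (cs : List Char) (q : Char) (s : Nat) :
    IsFirst (fun t => cs[t]? = some q ∧ cs[t-1]? ≠ some '\\') s (findClose cs q s) := by
  fun_induction findClose with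
  | case1 s hj =>
    have H := findFrom_isFirst cs [q] s (by simp)
    rw [hj] at H
    intro t ht hc
    exact H t ht ((prefix_one_iff cs q t).mpr hc.1)
  | case2 s j hj hesc ih =>
    have H := findFrom_isFirst cs [q] s (by simp)
    rw [hj] at H
    obtain ⟨h1, h2, h3⟩ := H
    refine IsFirst_weaken _ s (j+1) _ (by omega) ?_ ih
    intro t ht htl
    rcases Nat.lt_or_ge t j with h | h
    · intro hc; exact h3 t ht h ((prefix_one_iff cs q t).mpr hc.1)
    · have : t = j := by omega
      subst this
      intro hc; exact hc.2 hesc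
  | case3 s j hj hesc =>
    have H := findFrom_isFirst cs [q] s (by simp)
    rw [hj] at H
    obtain ⟨h1, h2, h3⟩ := H
    refine ⟨h1, ⟨(prefix_one_iff cs q j).mp h2, hesc⟩, ?_⟩
    intro t ht htj hc
    exact h3 t ht htj ((prefix_one_iff cs q t).mpr hc.1)

theorem findClose_step (cs : List Char) (q : Char) (k : Nat)
    (hk : ¬ (cs[k]? = some q ∧ cs[k-1]? ≠ some '\\')) :
    findClose cs q k = findClose cs q (k + 1) := by
  refine IsFirst_eq _ k _ _ (findClose_isFirst cs q k) ?_
  refine IsFirst_weaken _ k (k+1) _ (by omega) ?_ (findClose_isFirst cs q (k+1))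
  intro t ht htl
  have : t = k := by omega
  subst this; exact hk

theorem findFrom_step (cs pat : List Char) (k : Nat) (hne : pat ≠ [])
    (hk : ¬ pat <+: cs.drop k) : findFrom cs pat k = findFrom cs pat (k + 1) := by
  refine IsFirst_eq _ k _ _ (findFrom_isFirst cs pat k hne) ?_
  refine IsFirst_weaken _ k (k+1) _ (by omega) ?_ (findFrom_isFirst cs pat (k+1) hne)
  intro t ht htl
  have : t = k := by omega
  subst this; exact hk

theorem findFrom_at (cs pat : List Char) (k : Nat) (hne : pat ≠ []) (hk : pat <+: cs.drop k) :
    findFrom cs pat k = some k :=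
  IsFirst_eq _ k _ _ (findFrom_isFirst cs pat k hne)
    ⟨Nat.le_refl k, hk, fun t ht htl => by omega⟩

theorem findClose_at (cs : List Char) (q : Char) (k : Nat)
    (hk : cs[k]? = some q ∧ cs[k-1]? ≠ some '\\') : findClose cs q k = some k := by
  refine IsFirst_eq _ k _ _ (findClose_isFirst cs q k) ?_
  exact ⟨Nat.le_refl k, hk, fun t ht htl => by omega⟩

theorem drop_cons (cs : List Char) (i : Nat) (h : i < cs.length) :
    cs.drop i = cs[i] :: cs.drop (i + 1) :=
  List.drop_eq_getElem_cons h

theorem findFrom_none_of_ge (cs pat : List Char) (k : Nat) (hne : pat ≠ [])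
    (hk : cs.length ≤ k) : findFrom cs pat k = none := by
  cases h : findFrom cs pat k with
  | none => rfl
  | some j =>
    have H := findFrom_isFirst cs pat k hne
    rw [h] at H
    obtain ⟨h1, h2, -⟩ := H
    have hd : cs.drop j = [] := List.drop_eq_nil_of_le (by omega)
    rw [hd] at h2
    exact absurd (List.prefix_nil.mp h2) hne

theorem stepA_out_plain (cs : List Char) (i : Nat) (acc : List Char) (hi : i < cs.length)
    (hq : ¬(cs[i] = '"' ∨ cs[i] = '\'' ∨ cs[i] = '`'))
    (hcs : ¬(cs[i]? = some '/' ∧ cs[i+1]? = some '*')) :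
    loopA cs i false none false acc = loopA cs (i+1) false none false (acc ++ [cs[i]]) := by
  have e1 : (cs[i] = '"' ∨ cs[i] = '\'' ∨ cs[i] = '`') = False := by simp [hq]
  have e2 : (i + 1 < cs.length ∧ cs[i]? = some '/' ∧ cs[i+1]? = some '*') = False := by
    simp only [eq_iff_iff, iff_false]
    rintro ⟨-, h3, h4⟩; exact hcs ⟨h3, h4⟩
  rw [loopA, dif_pos hi]
  simp only [e1, e2, and_false, if_false]
  simp

theorem stepA_out_quote (cs : List Char) (i : Nat) (acc : List Char) (hi : i < cs.length)
    (hq : cs[i] = '"' ∨ cs[i] = '\'' ∨ cs[i] = '`') :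
    loopA cs i false none false acc = loopA cs (i+1) true (some cs[i]) false (acc ++ [cs[i]]) := by
  have e1 : (cs[i] = '"' ∨ cs[i] = '\'' ∨ cs[i] = '`') = True := by simp [hq]
  rw [loopA, dif_pos hi]
  simp only [e1, true_and, and_true]
  simp

theorem stepA_out_comment (cs : List Char) (i : Nat) (acc : List Char) (hi : i < cs.length)
    (h2 : cs[i]? = some '/' ∧ cs[i+1]? = some '*') :
    loopA cs i false none false acc = loopA cs (i+2) false none true acc := by
  have hb : i + 1 < cs.length := (List.getElem?_eq_some_iff.mp h2.2).1
  have hc : cs[i] = '/' := by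
    have h := h2.1; rw [List.getElem?_eq_getElem hi] at h; exact Option.some.inj h
  have e1 : (cs[i] = '"' ∨ cs[i] = '\'' ∨ cs[i] = '`') = False := by
    rw [hc]; simp
  have hc2 : cs[i+1] = '*' := by
    have h := h2.2; rw [List.getElem?_eq_getElem hb] at h; exact Option.some.inj h
  have e2 : (i + 1 < cs.length ∧ cs[i]? = some '/' ∧ cs[i+1]? = some '*') = True := by
    simp [hb, h2.1, hc2]
  rw [loopA, dif_pos hi]
  simp only [e1, e2, and_false, if_false, and_true]
  simp

theorem stepA_com_end (cs : List Char) (i : Nat) (acc : List Char) (hi : i < cs.length)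
    (h2 : cs[i]? = some '*' ∧ cs[i+1]? = some '/') :
    loopA cs i false none true acc = loopA cs (i+2) false none false acc := by
  have hb : i + 1 < cs.length := (List.getElem?_eq_some_iff.mp h2.2).1
  have hc2 : cs[i+1] = '/' := by
    have h := h2.2; rw [List.getElem?_eq_getElem hb] at h; exact Option.some.inj h
  have e3 : (i + 1 < cs.length ∧ cs[i]? = some '*' ∧ cs[i+1]? = some '/') = True := by
    simp [hb, h2.1, hc2]
  rw [loopA, dif_pos hi]
  simp only [e3, and_true]
  simp

theorem stepA_com_plain (cs : List Char) (i : Nat) (acc : List Char) (hi : i < cs.length)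
    (h2 : ¬(cs[i]? = some '*' ∧ cs[i+1]? = some '/')) :
    loopA cs i false none true acc = loopA cs (i+1) false none true acc := by
  have e3 : (i + 1 < cs.length ∧ cs[i]? = some '*' ∧ cs[i+1]? = some '/') = False := by
    simp only [eq_iff_iff, iff_false]
    rintro ⟨-, h3, h4⟩; exact h2 ⟨h3, h4⟩
  rw [loopA, dif_pos hi]
  simp only [e3, and_false, if_false]
  simp

theorem stepA_str_close (cs : List Char) (q : Char) (i : Nat) (acc : List Char) (hi : i < cs.length)
    (hk1 : 1 ≤ i) (hq : q = '"' ∨ q = '\'' ∨ q = '`')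
    (hc : cs[i] = q) (hesc : cs[i-1]? ≠ some '\\') :
    loopA cs i true (some q) false acc = loopA cs (i+1) false none false (acc ++ [cs[i]]) := by
  have hi0 : ¬ (i = 0) := by omega
  have e1 : (cs[i] = '"' ∨ cs[i] = '\'' ∨ cs[i] = '`') = True := by
    rw [hc]; simp [hq]
  have eelif : (some cs[i] = some q ∧ (i = 0 ∨ cs[i-1]? ≠ some '\\')) = True := by
    simp [hc, hesc]
  have e2 : (i + 1 < cs.length ∧ cs[i]? = some '/' ∧ cs[i+1]? = some '*') = False := by
    simp only [eq_iff_iff, iff_false]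
    rintro ⟨-, h3, -⟩
    rw [List.getElem?_eq_getElem hi, hc] at h3
    have := Option.some.inj h3
    rcases hq with h | h | h <;> (rw [h] at this; exact absurd this (by decide))
  rw [loopA, dif_pos hi]
  simp only [e1, eelif, e2, true_and, and_true, and_false, if_false, if_true]
  simp

theorem stepA_str_stay (cs : List Char) (q : Char) (i : Nat) (acc : List Char) (hi : i < cs.length)
    (hk1 : 1 ≤ i) (hnot : ¬(cs[i] = q ∧ cs[i-1]? ≠ some '\\')) :
    loopA cs i true (some q) false acc = loopA cs (i+1) true (some q) false (acc ++ [cs[i]]) := by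
  have hi0 : ¬ (i = 0) := by omega
  have eelif : (some cs[i] = some q ∧ (i = 0 ∨ cs[i-1]? ≠ some '\\')) = False := by
    by_cases hcq : cs[i] = q
    · have hesc : cs[i-1]? = some '\\' := by
        by_contra h; exact hnot ⟨hcq, h⟩
      simp [hcq, hesc, hi0]
    · simp [hcq]
  rw [loopA, dif_pos hi]
  by_cases hq1 : (cs[i] = '"' ∨ cs[i] = '\'' ∨ cs[i] = '`')
  · have e1 : (cs[i] = '"' ∨ cs[i] = '\'' ∨ cs[i] = '`') = True := by simp [hq1]
    simp only [e1, eelif, true_and, and_false, if_false, if_true]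
    simp
  · have e1 : (cs[i] = '"' ∨ cs[i] = '\'' ∨ cs[i] = '`') = False := by simp [hq1]
    simp only [e1, eelif, false_and, and_false, if_false]
    simp

theorem stepA_end (cs : List Char) (i : Nat) (inS : Bool) (sc : Option Char) (inC : Bool)
    (acc : List Char) (hi : ¬ i < cs.length) :
    loopA cs i inS sc inC acc = acc := by
  rw [loopA, dif_neg hi]


-- A in the comment state scans to the next '*/' and resumes after it
theorem L_comment (cs : List Char) :
    ∀ n k acc, cs.length - k ≤ n →
    loopA cs k false none true acc =
      (match findFrom cs ['*', '/'] k with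
       | none => acc
       | some e => loopA cs (e + 2) false none false acc) := by
  intro n
  induction n with
  | zero =>
    intro k acc hn
    rw [stepA_end cs k _ _ _ acc (by omega),
        findFrom_none_of_ge cs ['*', '/'] k (by simp) (by omega)]
  | succ n ih =>
    intro k acc hn
    by_cases hk : k < cs.length
    · by_cases hstar : cs[k]? = some '*' ∧ cs[k+1]? = some '/'
      · rw [stepA_com_end cs k acc hk hstar,
            findFrom_at cs ['*', '/'] k (by simp) ((prefix_two_iff cs '*' '/' k).mpr hstar)]
      · rw [stepA_com_plain cs k acc hk hstar, ih (k+1) acc (by omega),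
            ← findFrom_step cs ['*', '/'] k (by simp)
              (fun hp => hstar ((prefix_two_iff cs '*' '/' k).mp hp))]
    · rw [stepA_end cs k _ _ _ acc hk,
          findFrom_none_of_ge cs ['*', '/'] k (by simp) (by omega)]

-- A in the string state scans to the closing unescaped quote and resumes after it
theorem L_string (cs : List Char) (q : Char) (hq : q = '"' ∨ q = '\'' ∨ q = '`') :
    ∀ n k acc, cs.length - k ≤ n → 1 ≤ k →
    loopA cs k true (some q) false acc =
      (match findClose cs q k with
       | none => acc ++ cs.drop k
       | some j => loopA cs (j + 1) false none false (acc ++ (cs.drop k).take (j + 1 - k))) := by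
  intro n
  induction n with
  | zero =>
    intro k acc hn hk1
    have hnone : findClose cs q k = none := by
      cases h : findClose cs q k with
      | none => rfl
      | some j =>
        have H := findClose_isFirst cs q k
        rw [h] at H
        obtain ⟨h1, ⟨h2, -⟩, -⟩ := H
        have := (List.getElem?_eq_some_iff.mp h2).1
        omega
    rw [stepA_end cs k _ _ _ acc (by omega), hnone,
        List.drop_eq_nil_of_le (by omega : cs.length ≤ k), List.append_nil]
  | succ n ih =>
    intro k acc hn hk1
    by_cases hk : k < cs.length
    · by_cases hcl : cs[k]? = some q ∧ cs[k-1]? ≠ some '\\'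
      · have hc : cs[k] = q := by
          have h := hcl.1; rw [List.getElem?_eq_getElem hk] at h; exact Option.some.inj h
        rw [stepA_str_close cs q k acc hk hk1 hq hc hcl.2, findClose_at cs q k hcl]
        have ht : (cs.drop k).take (k + 1 - k) = [cs[k]] := by
          have h1 : k + 1 - k = 1 := by omega
          rw [h1, drop_cons cs k hk]
          rfl
        show loopA cs (k+1) false none false (acc ++ [cs[k]]) =
          loopA cs (k+1) false none false (acc ++ (cs.drop k).take (k + 1 - k))
        rw [ht]
      · have hnotc : ¬(cs[k] = q ∧ cs[k-1]? ≠ some '\\') := by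
          rintro ⟨h1, h2⟩
          exact hcl ⟨by rw [List.getElem?_eq_getElem hk, h1], h2⟩
        rw [stepA_str_stay cs q k acc hk hk1 hnotc, ih (k+1) (acc ++ [cs[k]]) (by omega) (by omega),
            ← findClose_step cs q k hcl]
        cases hfc : findClose cs q k with
        | none =>
          show (acc ++ [cs[k]]) ++ cs.drop (k+1) = acc ++ cs.drop k
          rw [drop_cons cs k hk]
          simp
        | some j =>
          have H := findClose_isFirst cs q k
          rw [hfc] at H
          obtain ⟨h1, h2, -⟩ := H
          have hjk : k + 1 ≤ j := by
            rcases Nat.eq_or_lt_of_le h1 with h | h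
            · exact absurd (h ▸ h2) hcl
            · omega
          have ha : j + 1 - k = (j - k) + 1 := by omega
          have hb : j + 1 - (k + 1) = j - k := by omega
          show loopA cs (j+1) false none false ((acc ++ [cs[k]]) ++ (cs.drop (k+1)).take (j+1-(k+1))) =
            loopA cs (j+1) false none false (acc ++ (cs.drop k).take (j+1-k))
          rw [hb, ha, drop_cons cs k hk, List.take_succ_cons]
          simp
    · have hnone : findClose cs q k = none := by
        cases h : findClose cs q k with
        | none => rfl
        | some j =>
          have H := findClose_isFirst cs q k
          rw [h] at H
          obtain ⟨h1, ⟨h2, -⟩, -⟩ := H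
          have := (List.getElem?_eq_some_iff.mp h2).1
          omega
      rw [stepA_end cs k _ _ _ acc hk, hnone,
          List.drop_eq_nil_of_le (by omega : cs.length ≤ k), List.append_nil]

-- A outside string/comment copies verbatim up to the first special position
theorem L_copy_to (cs : List Char) :
    ∀ n i p acc, p - i ≤ n → i ≤ p → p ≤ cs.length → (∀ t, i ≤ t → t < p → ¬ SpP cs t) →
    loopA cs i false none false acc = loopA cs p false none false (acc ++ (cs.drop i).take (p - i)) := by
  intro n
  induction n with
  | zero =>
    intro i p acc hn hip hpl hsp
    have : p = i := by omega
    subst this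
    simp
  | succ n ih =>
    intro i p acc hn hip hpl hsp
    rcases Nat.eq_or_lt_of_le hip with h | h
    · subst h; simp
    · have hi : i < cs.length := by omega
      have hs := hsp i (Nat.le_refl i) h
      rw [SpP] at hs
      push_neg at hs
      obtain ⟨⟨n1, n2⟩, n3, n4⟩ := hs
      have hq : ¬(cs[i] = '"' ∨ cs[i] = '\'' ∨ cs[i] = '`') := by
        rintro (h' | h' | h')
        · exact n1 ((prefix_one_iff cs '"' i).mpr (by rw [List.getElem?_eq_getElem hi, h']))
        · exact n2 ((prefix_one_iff cs '\'' i).mpr (by rw [List.getElem?_eq_getElem hi, h']))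
        · exact n3 ((prefix_one_iff cs '`' i).mpr (by rw [List.getElem?_eq_getElem hi, h']))
      have hcs : ¬(cs[i]? = some '/' ∧ cs[i+1]? = some '*') := by
        rintro ⟨h1, h2⟩
        exact n4 ((prefix_two_iff cs '/' '*' i).mpr ⟨h1, h2⟩)
      rw [stepA_out_plain cs i acc hi hq hcs,
          ih (i+1) p (acc ++ [cs[i]]) (by omega) (by omega) hpl
            (fun t ht htp => hsp t (by omega) htp)]
      have ha : p - i = (p - (i+1)) + 1 := by omega
      rw [ha, drop_cons cs i hi, List.take_succ_cons]
      simp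

theorem L_copy_none (cs : List Char) :
    ∀ n i acc, cs.length - i ≤ n → (∀ t, i ≤ t → ¬ SpP cs t) →
    loopA cs i false none false acc = acc ++ cs.drop i := by
  intro n
  induction n with
  | zero =>
    intro i acc hn hsp
    rw [stepA_end cs i _ _ _ acc (by omega),
        List.drop_eq_nil_of_le (by omega : cs.length ≤ i), List.append_nil]
  | succ n ih =>
    intro i acc hn hsp
    by_cases hi : i < cs.length
    · have hs := hsp i (Nat.le_refl i)
      rw [SpP] at hs
      push_neg at hs
      obtain ⟨⟨n1, n2⟩, n3, n4⟩ := hs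
      have hq : ¬(cs[i] = '"' ∨ cs[i] = '\'' ∨ cs[i] = '`') := by
        rintro (h' | h' | h')
        · exact n1 ((prefix_one_iff cs '"' i).mpr (by rw [List.getElem?_eq_getElem hi, h']))
        · exact n2 ((prefix_one_iff cs '\'' i).mpr (by rw [List.getElem?_eq_getElem hi, h']))
        · exact n3 ((prefix_one_iff cs '`' i).mpr (by rw [List.getElem?_eq_getElem hi, h']))
      have hcs : ¬(cs[i]? = some '/' ∧ cs[i+1]? = some '*') := by
        rintro ⟨h1, h2⟩
        exact n4 ((prefix_two_iff cs '/' '*' i).mpr ⟨h1, h2⟩)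
      rw [stepA_out_plain cs i acc hi hq hcs, ih (i+1) (acc ++ [cs[i]]) (by omega)
            (fun t ht => hsp t (by omega)),
          drop_cons cs i hi]
      simp
    · rw [stepA_end cs i _ _ _ acc hi,
          List.drop_eq_nil_of_le (by omega : cs.length ≤ i), List.append_nil]

theorem mainLoop (cs : List Char) :
    ∀ n i acc, cs.length - i ≤ n → loopA cs i false none false acc = loopB cs i acc := by
  intro n
  induction n with
  | zero =>
    intro i acc hn
    rw [stepA_end cs i _ _ _ acc (by omega), loopB, dif_neg (by omega)]
  | succ n ih =>
    intro i acc hn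
    by_cases hi : i < cs.length
    · rw [loopB, dif_pos hi]
      have HF : IsFirst (SpP cs) i
          (minOpt (minOpt (findFrom cs ['"'] i) (findFrom cs ['\''] i))
            (minOpt (findFrom cs ['`'] i) (findFrom cs ['/', '*'] i))) := by
        have h12 := minOpt_isFirst _ _ i _ _
          (findFrom_isFirst cs ['"'] i (by simp)) (findFrom_isFirst cs ['\''] i (by simp))
        have h34 := minOpt_isFirst _ _ i _ _
          (findFrom_isFirst cs ['`'] i (by simp)) (findFrom_isFirst cs ['/', '*'] i (by simp))
        exact minOpt_isFirst _ _ i _ _ h12 h34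
      split
      · next hM =>
        rw [hM] at HF
        exact L_copy_none cs cs.length i acc (by omega) (fun t ht => HF t ht)
      · next p hM =>
        rw [hM] at HF
        obtain ⟨hip, hsp, hmin⟩ := HF
        have hplen : p < cs.length := by
          rcases hsp with (h | h) | (h | h)
          · exact (List.getElem?_eq_some_iff.mp ((prefix_one_iff cs '"' p).mp h)).1
          · exact (List.getElem?_eq_some_iff.mp ((prefix_one_iff cs '\'' p).mp h)).1
          · exact (List.getElem?_eq_some_iff.mp ((prefix_one_iff cs '`' p).mp h)).1
          · exact (List.getElem?_eq_some_iff.mp ((prefix_two_iff cs '/' '*' p).mp h).1).1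
        have hgd : cs.getD p ' ' = cs[p] := by
          rw [List.getD_eq_getElem?_getD, List.getElem?_eq_getElem hplen]
          rfl
        have hchar : ∀ (c : Char), cs[p]? = some c → cs[p] = c := by
          intro c h
          rw [List.getElem?_eq_getElem hplen] at h
          exact Option.some.inj h
      
        rw [L_copy_to cs (p - i) i p acc (by omega) hip (by omega)
              (fun t ht htp => hmin t ht htp)]
        split_ifs with hslash
        · -- next special is '/*': comment jump
          have hpc : cs[p] = '/' := by rw [← hgd]; exact hslash
          have hstar : cs[p]? = some '/' ∧ cs[p+1]? = some '*' := by
            rcases hsp with (h | h) | (h | h)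
            · exact absurd (hchar _ ((prefix_one_iff cs '"' p).mp h) ▸ hpc) (by decide)
            · exact absurd (hchar _ ((prefix_one_iff cs '\'' p).mp h) ▸ hpc) (by decide)
            · exact absurd (hchar _ ((prefix_one_iff cs '`' p).mp h) ▸ hpc) (by decide)
            · exact (prefix_two_iff cs '/' '*' p).mp h
          rw [stepA_out_comment cs p _ hplen hstar,
              L_comment cs cs.length (p+2) _ (by omega)]
          cases hE : findFrom cs ['*', '/'] (p + 2) with
          | none => rfl
          | some e =>
            have he := findFrom_ge cs ['*', '/'] (p + 2) e hE
            show loopA cs (e+2) false none false (acc ++ (cs.drop i).take (p - i)) =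
              loopB cs (e+2) (acc ++ (cs.drop i).take (p - i))
            exact ih (e+2) _ (by omega)
        · -- next special is a quote: string jump
          have hq' : cs[p] = '"' ∨ cs[p] = '\'' ∨ cs[p] = '`' := by
            rcases hsp with (h | h) | (h | h)
            · exact Or.inl (hchar _ ((prefix_one_iff cs '"' p).mp h))
            · exact Or.inr (Or.inl (hchar _ ((prefix_one_iff cs '\'' p).mp h)))
            · exact Or.inr (Or.inr (hchar _ ((prefix_one_iff cs '`' p).mp h)))
            · exact absurd (hgd.trans (hchar _ ((prefix_two_iff cs '/' '*' p).mp h).1)) hslash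
          rw [stepA_out_quote cs p _ hplen hq',
              L_string cs cs[p] hq' cs.length (p+1) _ (by omega) (by omega), hgd]
          have hacc : acc ++ (cs.drop i).take (p + 1 - i) =
              (acc ++ (cs.drop i).take (p - i)) ++ [cs[p]] := by
            have h1 : p + 1 - i = (p - i) + 1 := by omega
            have h2 : (cs.drop i)[p - i]? = some cs[p] := by
              rw [List.getElem?_drop]
              have h3 : i + (p - i) = p := by omega
              rw [h3, List.getElem?_eq_getElem hplen]
            rw [h1, List.take_add_one, h2, List.append_assoc]
            rfl
          cases hJ : findClose cs cs[p] (p + 1) with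
          | none =>
            show ((acc ++ (cs.drop i).take (p - i)) ++ [cs[p]]) ++ cs.drop (p+1) =
              (acc ++ (cs.drop i).take (p + 1 - i)) ++ cs.drop (p+1)
            rw [hacc]
          | some j =>
            have hj := findClose_ge cs cs[p] (p + 1) j hJ
            have hb : j + 1 - (p + 1) = j - p := by omega
            show loopA cs (j+1) false none false
                (((acc ++ (cs.drop i).take (p - i)) ++ [cs[p]]) ++ (cs.drop (p+1)).take (j+1-(p+1))) =
              loopB cs (j+1) ((acc ++ (cs.drop i).take (p + 1 - i)) ++ (cs.drop (p+1)).take (j - p))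
            rw [hb, hacc]
            exact ih (j+1) _ (by omega)
    · rw [stepA_end cs i _ _ _ acc hi, loopB, dif_neg hi]


-- ===== VERDICT (by name: the statement is the Claim_ definition above) =====
theorem remove_multiline_comments_safe_spec : Claim_equal_remove_multiline_comments_safe := by
  intro content _hdom
  show remove_multiline_comments_safe content = remove_multiline_comments_safe_alt content
  unfold remove_multiline_comments_safe remove_multiline_comments_safe_alt
  exact congrArg String.ofList (mainLoop content.toList content.toList.length 0 [] (by omega))
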